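-- pv_equiv track=rewrite | github.com/SohaibAamir28/M-IT-2-2025-Winter-Contest | advanced/1.py | number_reduction
-- ===== SOURCE A (Python) =====
-- def number_reduction(N):
--     MOD = 10**9 + 7
--     primes = [2, 3, 5, 7]
--
--     def dfs(k, valid):
--         if k in valid:
--             return
--         valid.add(k)
--         for p in primes:
--             if k % p == 0:
--                 dfs(k // p, valid)
--
--     def count_valid(N):
--         valid = set()
--         dfs(1, valid)
--         count = 0
--         for k in range(1, N + 1):
--             if all(d not in '23456789' or k % int(d) == 0 for d in str(k)):
--                 count += 1
--         return count
--
--     return count_valid(N)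
-- ===== SOURCE B (Python) =====
-- # DP over the numbers themselves: a memo table L with L[k] = lcm of the nonzero-ish
-- # digits of k, filled in one pass via L[k] = lcm(L[k//10], k%10) (digits 0,1 contribute 1),
-- # so each k needs one table lookup and one gcd instead of converting k to a string and
-- # testing every digit; k is counted when k % L[k] == 0. A's dead dfs/valid set is dropped.
-- def number_reduction(N):
--     def gcd(a, b):
--         while b:
--             a, b = b, a % b
--         return a
--     L = [1] * (N + 1)
--     count = 0
--     for k in range(1, N + 1):
--         d = k % 10
--         g = L[k // 10]
--         if d > 1:
--             g = g * d // gcd(g, d)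
--         L[k] = g
--         if k % g == 0:
--             count += 1
--     return count
-- ===== Notes on version B (the rewrite author's own statement) =====
-- stated objective: faster
-- what changed: B replaces A's per-number string-digit scan by dynamic programming: a memo table holding, for each number, the lcm of its digits is filled in one pass (each entry is the lcm of the entry for the number with its last digit removed and that last digit), so each k costs one table lookup plus one gcd and a single divisibility test of k by its table entry, instead of a str(k) conversion and a per-digit divisibility test; A's dead dfs/valid-set computation is dropped.
import Mathlib
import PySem

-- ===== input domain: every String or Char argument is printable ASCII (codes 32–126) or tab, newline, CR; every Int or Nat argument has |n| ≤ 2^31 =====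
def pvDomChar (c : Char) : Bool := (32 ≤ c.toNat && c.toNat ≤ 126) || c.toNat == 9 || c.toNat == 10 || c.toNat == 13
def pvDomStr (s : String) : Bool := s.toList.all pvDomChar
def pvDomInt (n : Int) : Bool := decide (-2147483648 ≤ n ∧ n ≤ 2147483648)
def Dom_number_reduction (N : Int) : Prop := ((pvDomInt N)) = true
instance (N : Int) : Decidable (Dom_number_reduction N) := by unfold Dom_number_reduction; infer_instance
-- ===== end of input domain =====

-- B replaces A's per-k string-digit scan by a one-pass memo table L[k] = lcm(L[k//10], k%10)
-- and a single divisibility test k % L[k] == 0; return value is provably identical.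

-- ===== PORT A =====
def pvPrimesA : List Int := [2, 3, 5, 7]

-- dfs(k, valid): the fuel argument only justifies termination in Lean; fuel = 2 is exact
-- for the single call dfs(1, set()) A makes, since 1 % p ≠ 0 for every p in primes and
-- hence no recursive call ever fires.
def pvDfsA : Nat → Int → PySem.Set Int → PySem.Set Int
  | 0, _, valid => valid
  | fuel + 1, k, valid =>
    if PySem.Set.contains valid k then valid
    else
      let valid := PySem.Set.add valid k
      pvPrimesA.foldl
        (fun v p => if PySem.Int.mod k p == 0 then pvDfsA fuel (PySem.Int.floordiv k p) v else v)
        valid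

-- all(d not in '23456789' or k % int(d) == 0 for d in str(k)); 'd in s' for the 1-char d
-- is character membership, and int(d) is only reached when d is one of '2'..'9' (where
-- ofChars? is some), so the .getD 0 default is never consulted.
def pvCheckA (k : Int) : Bool :=
  (PySem.Int.toChars k).all fun d =>
    !(("23456789".toList).contains d) ||
      (PySem.Int.mod k ((PySem.Int.ofChars? [d]).getD 0) == 0)

def number_reduction (N : Int) : Int :=
  let _valid := pvDfsA 2 1 PySem.Set.empty
  (PySem.List.pyRange 1 (N + 1) 1).foldl
    (fun count k => if pvCheckA k then count + 1 else count) 0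

-- ===== PORT B =====
-- the 'while b: a, b = b, a % b' Euclid loop of Source B
def pvGcdB (a b : Int) : Int :=
  if h : b ≠ 0 then pvGcdB b (PySem.Int.mod a b) else a
termination_by b.natAbs
decreasing_by
  rcases lt_or_gt_of_ne h with hb | hb
  · have := PySem.Int.mod_neg_bounds a hb; omega
  · have h1 := PySem.Int.mod_nonneg a hb
    have h2 := PySem.Int.mod_lt a hb
    omega

def number_reduction_alt (N : Int) : Int :=
  let st := (PySem.List.pyRange 1 (N + 1) 1).foldl
    (fun (st : List Int × Int) k =>
      let d := PySem.Int.mod k 10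
      let g0 := PySem.List.pyGetD st.1 (PySem.Int.floordiv k 10) 0
      let g := if 1 < d then PySem.Int.floordiv (g0 * d) (pvGcdB g0 d) else g0
      (PySem.List.pySetD st.1 k g,
       st.2 + if PySem.Int.mod k g == 0 then 1 else 0))
    (PySem.List.pyRepeat [1] (N + 1), 0)
  st.2

-- ===== PRECONDITION & SPEC =====
def Spec_number_reduction (N : Int) (out : Int) : Prop := out = number_reduction_alt N
instance (N : Int) (out : Int) : Decidable (Spec_number_reduction N out) := by unfold Spec_number_reduction; infer_instance

-- ===== CLAIM (what is proved, stated in full; the proofs are below) =====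
def Claim_equal_number_reduction : Prop := ∀ (N : Int), Dom_number_reduction N → Spec_number_reduction N (number_reduction N)

-- ===== LEMMAS AND PROOFS =====

-- the common digit predicate: digit d (of k) is fine iff d < 2 or d divides k
def pvDigitOk (k : Int) (d : Nat) : Bool :=
  !(decide (2 ≤ (d : Int)) && (PySem.Int.mod k (d : Int) != 0))

-- mathematical model of B's table entries: lcm of the digits ≥ 2 of n
def pvDLcm (n : Nat) : Nat :=
  if h : n = 0 then 1
  else if 1 < n % 10 then Nat.lcm (pvDLcm (n / 10)) (n % 10) else pvDLcm (n / 10)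
termination_by n
decreasing_by all_goals exact Nat.div_lt_self (Nat.pos_of_ne_zero h) (by norm_num)

lemma pvDLcm_dvd_iff (n m : Nat) :
    pvDLcm n ∣ m ↔ ∀ d ∈ Nat.digits 10 n, (1 < d → d ∣ m) := by
  induction n using Nat.strong_induction_on with
  | _ n ih =>
    by_cases h : n = 0
    · simp [h, pvDLcm]
    · rw [pvDLcm, dif_neg h,
        Nat.digits_def' (by norm_num : 1 < 10) (Nat.pos_of_ne_zero h)]
      have ihh := ih (n / 10) (Nat.div_lt_self (Nat.pos_of_ne_zero h) (by norm_num))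
      split_ifs with hd
      · rw [Nat.lcm_dvd_iff, ihh]
        constructor
        · rintro ⟨h1, h2⟩ d hmem hd2
          rcases List.mem_cons.mp hmem with rfl | hmem
          · exact h2
          · exact h1 d hmem hd2
        · intro hall
          exact ⟨fun d hmem hd2 => hall d (List.mem_cons_of_mem _ hmem) hd2,
            hall _ (List.mem_cons_self) hd⟩
      · rw [ihh]
        constructor
        · intro hall d hmem hd2
          rcases List.mem_cons.mp hmem with rfl | hmem
          · omega
          · exact hall d hmem hd2
        · intro hall d hmem hd2
          exact hall d (List.mem_cons_of_mem _ hmem) hd2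

-- Euclid loop = Nat.gcd on nonnegative inputs
lemma pvGcdB_natCast (a b : Nat) : pvGcdB (a : Int) (b : Int) = (Nat.gcd b a : Int) := by
  induction b using Nat.strong_induction_on generalizing a with
  | _ b ih =>
    rw [pvGcdB]
    by_cases hb : b = 0
    · subst hb; simp
    · rw [dif_pos (by exact_mod_cast hb)]
      rw [show PySem.Int.mod (a : Int) (b : Int) = ((a % b : Nat) : Int) from
        PySem.Int.mod_natCast a b]
      rw [ih (a % b) (Nat.mod_lt _ (Nat.pos_of_ne_zero hb)) b]
      rw [Nat.gcd_comm (a % b) b, Nat.gcd_rec b a]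
      congr 1
      exact (Nat.gcd_comm _ _)

-- g * d // gcd(g, d) = lcm g d
lemma pvStep_lcm (g d : Nat) :
    PySem.Int.floordiv ((g : Int) * (d : Int)) (pvGcdB (g : Int) (d : Int)) =
      (Nat.lcm g d : Int) := by
  rw [pvGcdB_natCast, Nat.gcd_comm d g]
  rw [show (g : Int) * (d : Int) = ((g * d : Nat) : Int) by push_cast; ring]
  rw [PySem.Int.floordiv_natCast]
  rfl

-- B's model table after processing 1..n (table size sz)
def pvTable (sz n : Nat) : List Int :=
  (List.range sz).map (fun i => if 1 ≤ i ∧ i ≤ n then (pvDLcm i : Int) else 1)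

def pvCount (n : Nat) : Nat :=
  (List.range n).countP (fun i => pvDLcm (i + 1) ∣ (i + 1))

lemma pvTable_get (sz n i : Nat) (hi : i < sz) :
    (pvTable sz n).getD i 0 = if 1 ≤ i ∧ i ≤ n then (pvDLcm i : Int) else 1 := by
  simp [pvTable, List.getD_eq_getElem?_getD, hi]

lemma pvDLcm_succ (n : Nat) (h : ¬ n = 0) :
    pvDLcm n = if 1 < n % 10 then Nat.lcm (pvDLcm (n / 10)) (n % 10) else pvDLcm (n / 10) := by
  rw [pvDLcm, dif_neg h]

lemma pvTable_set (sz n : Nat) (hn : n + 1 < sz) :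
    (pvTable sz n).set (n + 1) (pvDLcm (n + 1) : Int) = pvTable sz (n + 1) := by
  have hlen : (pvTable sz n).length = sz := by simp [pvTable]
  apply List.ext_getElem?
  intro i
  by_cases he : n + 1 = i
  · subst he
    rw [List.getElem?_set_self (by omega)]
    simp only [pvTable, List.getElem?_map,
      show (List.range sz)[n + 1]? = some (n + 1) from by simp [hn], Option.map_some]
    rw [if_pos (by omega)]
  · rw [List.getElem?_set_ne he]
    by_cases hi : i < sz
    · simp only [pvTable, List.getElem?_map,
        show (List.range sz)[i]? = some i from by simp [hi], Option.map_some]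
      have hiff : (1 ≤ i ∧ i ≤ n) ↔ (1 ≤ i ∧ i ≤ n + 1) := by omega
      rw [if_congr hiff rfl rfl]
    · simp only [pvTable, List.getElem?_map,
        show (List.range sz)[i]? = none from by simp; omega, Option.map_none]

-- one body step at k = n+1 turns (table n, count n) into (table (n+1), count (n+1))
lemma pvLoop_invariant (sz n : Nat) (hn : n < sz) :
    (PySem.List.pyRange 1 ((n : Int) + 1) 1).foldl
      (fun (st : List Int × Int) k =>
        let d := PySem.Int.mod k 10
        let g0 := PySem.List.pyGetD st.1 (PySem.Int.floordiv k 10) 0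
        let g := if 1 < d then PySem.Int.floordiv (g0 * d) (pvGcdB g0 d) else g0
        (PySem.List.pySetD st.1 k g,
         st.2 + if PySem.Int.mod k g == 0 then 1 else 0))
      (List.replicate sz 1, 0)
    = (pvTable sz n, (pvCount n : Int)) := by
  induction n with
  | zero =>
    rw [PySem.List.pyRange_one_eq_nil (by norm_num), List.foldl_nil]
    have h0 : pvTable sz 0 = List.replicate sz 1 := by
      unfold pvTable
      have hc : ∀ i ∈ List.range sz,
          (if 1 ≤ i ∧ i ≤ 0 then ((pvDLcm i : Int)) else 1) = (fun _ => (1 : Int)) i := by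
        intro i _
        split_ifs with h
        · omega
        · rfl
      rw [List.map_congr_left hc]
      simp
    rw [h0]
    simp [pvCount]
  | succ n ih =>
    have hmod : PySem.Int.mod ((n : Int) + 1) 10 = (((n + 1) % 10 : Nat) : Int) := by
      exact_mod_cast PySem.Int.mod_natCast (n + 1) 10
    have hdiv : PySem.Int.floordiv ((n : Int) + 1) 10 = (((n + 1) / 10 : Nat) : Int) := by
      exact_mod_cast PySem.Int.floordiv_natCast (n + 1) 10
    rw [show ((n + 1 : Nat) : Int) + 1 = ((n : Int) + 1) + 1 by push_cast; ring,
      PySem.List.pyRange_one_succ_right (by omega), List.foldl_append,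
      ih (by omega), List.foldl_cons, List.foldl_nil]
    simp only [hmod, hdiv]
    have hg : PySem.List.pyGetD (pvTable sz n) (((n + 1) / 10 : Nat) : Int) 0
        = (pvDLcm ((n + 1) / 10) : Int) := by
      rw [PySem.List.pyGetD_natCast,
        pvTable_get sz n _ (by omega : (n + 1) / 10 < sz)]
      by_cases h10 : 1 ≤ (n + 1) / 10
      · rw [if_pos ⟨h10, by omega⟩]
      · rw [if_neg (by omega)]
        have h0 : (n + 1) / 10 = 0 := by omega
        rw [h0, pvDLcm]
        simp
    rw [hg]
    have hnew : (if 1 < (((n + 1) % 10 : Nat) : Int) then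
          PySem.Int.floordiv ((pvDLcm ((n + 1) / 10) : Int) * (((n + 1) % 10 : Nat) : Int))
            (pvGcdB (pvDLcm ((n + 1) / 10) : Int) (((n + 1) % 10 : Nat) : Int))
        else (pvDLcm ((n + 1) / 10) : Int)) = (pvDLcm (n + 1) : Int) := by
      rw [pvDLcm_succ (n + 1) (by omega)]
      by_cases hd : 1 < (n + 1) % 10
      · rw [if_pos (by exact_mod_cast hd), if_pos hd, pvStep_lcm]
      · rw [if_neg (by exact_mod_cast hd), if_neg hd]
    rw [hnew]
    apply Prod.ext
    · rw [show ((n : Int) + 1) = ((n + 1 : Nat) : Int) by push_cast; ring,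
        PySem.List.pySetD_natCast]
      exact pvTable_set sz n hn
    · have hdvd : (PySem.Int.mod ((n : Int) + 1) (pvDLcm (n + 1) : Int) == 0)
          = decide (pvDLcm (n + 1) ∣ (n + 1)) := by
        rw [Bool.eq_iff_iff, beq_iff_eq, decide_eq_true_iff,
          PySem.Int.mod_eq_zero_iff_dvd,
          show ((n : Int) + 1) = ((n + 1 : Nat) : Int) by push_cast; ring,
          Int.natCast_dvd_natCast]
      rw [hdvd]
      unfold pvCount
      rw [List.range_succ, List.countP_append]
      simp only [List.countP_singleton]
      push_cast
      by_cases h : pvDLcm (n + 1) ∣ (n + 1) <;> simp [h]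

lemma pvCheckB_model (N : Int) (hN : 0 < N) :
    number_reduction_alt N = (pvCount N.toNat : Int) := by
  unfold number_reduction_alt
  rw [show N = ((N.toNat : Nat) : Int) by omega, PySem.List.pyRepeat_singleton,
    show (((N.toNat : Nat) : Int) + 1).toNat = N.toNat + 1 by omega]
  have h := pvLoop_invariant (N.toNat + 1) N.toNat (by omega)
  simp only at h ⊢
  rw [h, show ((N.toNat : Int)).toNat = N.toNat by omega]

-- A's per-character test, evaluated at the character of a decimal digit d < 10
lemma pvCharPred (k : Int) (d : Nat) (hd : d < 10) :
    (!(("23456789".toList).contains (Nat.digitChar d)) ||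
      (PySem.Int.mod k ((PySem.Int.ofChars? [Nat.digitChar d]).getD 0) == 0)) = pvDigitOk k d := by
  have h1 : ("23456789".toList).contains (Nat.digitChar d) = decide (2 ≤ (d : Int)) := by
    interval_cases d <;> decide
  have h2 : (PySem.Int.ofChars? [Nat.digitChar d]).getD 0 = (d : Int) := by
    interval_cases d <;> decide
  rw [h1, h2, pvDigitOk]
  by_cases hp : (2 ≤ (d : Int)) <;> simp [hp, bne]

lemma pvToDigitsCore_eq (f : Nat) : ∀ n acc, 0 < n → n < f →
    Nat.toDigitsCore 10 f n acc = ((Nat.digits 10 n).reverse.map Nat.digitChar) ++ acc := by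
  induction f with
  | zero => intro n acc hn hf; omega
  | succ f ih =>
    intro n acc hn hf
    rw [Nat.toDigitsCore]
    by_cases h0 : n / 10 = 0
    · rw [if_pos h0]
      rw [Nat.digits_def' (by norm_num : 1 < 10) hn, h0]
      simp
    · rw [if_neg h0]
      rw [ih (n / 10) _ (Nat.pos_of_ne_zero h0) (by
        have := Nat.div_lt_self hn (by norm_num : 1 < 10); omega)]
      rw [Nat.digits_def' (by norm_num : 1 < 10) hn]
      simp

lemma pvToDigits_eq (n : Nat) (hn : 0 < n) :
    Nat.toDigits 10 n = (Nat.digits 10 n).reverse.map Nat.digitChar := by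
  rw [Nat.toDigits, pvToDigitsCore_eq (n + 1) n [] hn (by omega), List.append_nil]

-- A's whole-number test agrees with B's single divisibility test
lemma pvCheckA_eq_dvd (n : Nat) (hn : 0 < n) :
    pvCheckA (n : Int) = decide (pvDLcm n ∣ n) := by
  rw [pvCheckA, PySem.Int.toChars, if_neg (by omega : ¬ (n : Int) < 0), Int.toNat_natCast,
    pvToDigits_eq n hn, List.all_map, List.all_reverse]
  rw [Bool.eq_iff_iff, List.all_eq_true, decide_eq_true_iff, pvDLcm_dvd_iff]
  constructor
  · intro h d hd hd2
    have hx := h d hd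
    simp only [Function.comp] at hx
    rw [pvCharPred (n : Int) d (Nat.digits_lt_base (by norm_num) hd), pvDigitOk] at hx
    simp only [Bool.not_and, Bool.or_eq_true, Bool.not_eq_true', decide_eq_false_iff_not,
      bne, Bool.not_not, beq_iff_eq] at hx
    rcases hx with hx | hx
    · omega
    · rw [PySem.Int.mod_eq_zero_iff_dvd] at hx
      exact_mod_cast hx
  · intro h d hd
    simp only [Function.comp]
    rw [pvCharPred (n : Int) d (Nat.digits_lt_base (by norm_num) hd), pvDigitOk]
    simp only [Bool.not_and, Bool.or_eq_true, Bool.not_eq_true', decide_eq_false_iff_not,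
      bne, Bool.not_not, beq_iff_eq]
    by_cases hd2 : 1 < d
    · right
      rw [PySem.Int.mod_eq_zero_iff_dvd]
      exact_mod_cast h d hd hd2
    · left; omega

-- ===== VERDICT (by name: the statement is the Claim_ definition above) =====
theorem number_reduction_spec : Claim_equal_number_reduction := by
  intro N _
  unfold Spec_number_reduction
  by_cases hN : N ≤ 0
  · unfold number_reduction number_reduction_alt
    rw [PySem.List.pyRange_one_eq_nil (by omega)]
    rfl
  · rw [not_le] at hN
    rw [pvCheckB_model N hN]
    unfold number_reduction
    rw [PySem.List.foldl_if_add_one]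
    rw [PySem.List.pyRange_one, show (N + 1 - 1).toNat = N.toNat from by omega,
      List.countP_map]
    have hc : ∀ i ∈ List.range N.toNat,
        (pvCheckA ∘ fun k : Nat => 1 + (k : Int)) i
          = (fun i => decide (pvDLcm (i + 1) ∣ (i + 1))) i := by
      intro i _
      simp only [Function.comp]
      rw [show (1 : Int) + (i : Int) = ((i + 1 : Nat) : Int) by push_cast; ring]
      exact pvCheckA_eq_dvd (i + 1) (by omega)
    rw [List.countP_congr (fun x hx => by rw [hc x hx])]
    rw [pvCount]
    simp
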